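-- pv_equiv track=rewrite | github.com/uenoka/atc | leetcode/increasing-decreasing-string.py | sortString
-- ===== SOURCE A (Python) =====
-- def sortString(s: str) -> str:
--     used = [False]*len(s)
--     s = list(s)
--     s.sort()
--     ans = s[0]
--     used[0] = True
--     rflg = False
--     while False in used:
--         for i,c in enumerate(s):
--             if not rflg and ans[-1] < c and not used[i]:
--                 ans += c
--                 used[i]=True
--             if rflg and ans[-1] > c and not used[i]:
--                 ans += c
--                 used[i]=True
--         s = list(reversed(s))
--         used = list(reversed(used))
--
--         for i,f in enumerate(used):
--             if not f:
--                 ans += s[i]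
--                 used[i] = True
--                 break
--         rflg = not rflg
--
--     return ans
--
-- s = "leetcode"
-- ===== SOURCE B (Python) =====
-- def sortString(s: str) -> str:
--     counts = {}
--     for ch in s:
--         counts[ch] = counts.get(ch, 0) + 1
--     pairs = [(ch, counts[ch]) for ch in sorted(counts)]
--     out = []
--     asc = True
--     while pairs:
--         src = pairs if asc else pairs[::-1]
--         nxt = []
--         for ch, k in src:
--             out.append(ch)
--             if k > 1:
--                 nxt.append((ch, k - 1))
--         pairs = nxt if asc else nxt[::-1]
--         asc = not asc
--     return ''.join(out)
-- ===== Notes on version B (the rewrite author's own statement) =====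
-- stated objective: faster
-- what changed: B counts each character's frequency once into a dict, builds a sorted (char, count) list, and emits whole ascending/descending rounds over the distinct characters, instead of A's repeated flagged rescans of the sorted character list with per-character string concatenation.
import Mathlib
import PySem

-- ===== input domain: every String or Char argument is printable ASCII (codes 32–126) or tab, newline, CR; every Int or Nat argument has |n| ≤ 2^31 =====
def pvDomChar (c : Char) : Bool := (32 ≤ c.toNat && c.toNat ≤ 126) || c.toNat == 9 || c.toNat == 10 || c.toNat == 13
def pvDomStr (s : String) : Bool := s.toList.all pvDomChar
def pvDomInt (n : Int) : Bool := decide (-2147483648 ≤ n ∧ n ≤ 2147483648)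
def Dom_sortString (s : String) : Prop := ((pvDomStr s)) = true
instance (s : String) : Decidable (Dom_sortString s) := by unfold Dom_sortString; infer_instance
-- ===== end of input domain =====

-- B counts letter frequencies once and emits alternating ascending/descending rounds over the
-- distinct characters (O(n·k) with k distinct chars) instead of A's repeated flagged scans of the
-- sorted list with string concatenation; objective: faster.

-- ===== PORT A =====
-- Python ans[-1]; ans is never empty wherever this is used (it starts as s[0])
def pvLast (ans : List Char) : Char := (PySem.List.pyGet? ans (-1)).getD ' '

-- the 'for i,c in enumerate(s)' pass: z pairs each char with its used-flag
def pvPassA : List (Char × Bool) → List Char → Bool → List Char × List (Char × Bool)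
  | [], ans, _ => (ans, [])
  | (c, u) :: t, ans, rflg =>
    let hit1 := !rflg && decide (pvLast ans < c) && !u
    let ans1 := if hit1 then ans ++ [c] else ans
    let u1 := if hit1 then true else u
    let hit2 := rflg && decide (c < pvLast ans1) && !u1
    let ans2 := if hit2 then ans1 ++ [c] else ans1
    let u2 := if hit2 then true else u1
    ((pvPassA t ans2 rflg).1, (c, u2) :: (pvPassA t ans2 rflg).2)

-- the 'for i,f in enumerate(used): if not f: …; break' pass
def pvPickA : List (Char × Bool) → List Char → List (Char × Bool) × List Char
  | [], ans => ([], ans)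
  | (c, u) :: t, ans =>
    if !u then ((c, true) :: t, ans ++ [c])
    else ((c, u) :: (pvPickA t ans).1, (pvPickA t ans).2)

-- the while loop; fuel bounds the number of iterations (each iteration marks ≥ 1 flag used,
-- so fuel = len(s) is always enough; this only makes the recursion total)
def pvLoopA : Nat → List (Char × Bool) → List Char → Bool → List Char
  | 0, _, ans, _ => ans
  | f + 1, z, ans, rflg =>
    if z.any (fun p => !p.2) then
      let pr := pvPassA z ans rflg
      let z2 := pr.2.reverse
      let pk := pvPickA z2 pr.1
      pvLoopA f pk.1 pk.2 (!rflg)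
    else ans

def sortString (s : String) : String :=
  let l := PySem.List.sorted s.toList (fun x => x) false
  match l with
  | [] => ""   -- Python raises IndexError on '' (ans = s[0]); excluded by Pre_sortString
  | c :: rest =>
    -- used = [False]*len(s); used[0] = True
    let used := true :: List.replicate rest.length false
    String.mk (pvLoopA (c :: rest).length ((c :: rest).zip used) [c] false)

-- ===== PORT B =====
-- one round: 'for ch, k in src: out.append(ch); if k > 1: nxt.append((ch, k-1))'
def pvRoundB : List (Char × Int) → List Char × List (Char × Int)
  | [] => ([], [])
  | (c, k) :: t =>
    (c :: (pvRoundB t).1, if 1 < k then (c, k - 1) :: (pvRoundB t).2 else (pvRoundB t).2)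

-- the 'while pairs' loop; fuel = len(s) bounds the number of rounds (each round drops ≥ 1 char)
def pvLoopB : Nat → List (Char × Int) → Bool → List Char
  | 0, _, _ => []
  | f + 1, pairs, asc =>
    if pairs = [] then []
    else
      let src := if asc then pairs else pairs.reverse
      (pvRoundB src).1 ++ pvLoopB f (if asc then (pvRoundB src).2 else (pvRoundB src).2.reverse) (!asc)

def sortString_alt (s : String) : String :=
  let counts := s.toList.foldl (fun d c => d.insert c (d.getD c 0 + 1)) PySem.Dict.empty
  let pairs := (PySem.List.sorted counts.keys (fun x => x) false).map (fun c => (c, counts.getD c 0))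
  String.mk (pvLoopB s.toList.length pairs true)

-- ===== PRECONDITION & SPEC =====
-- A evaluates s[0] on the sorted list, so it raises IndexError exactly on the empty string.
def Pre_sortString (s : String) : Prop := s ≠ ""
instance (s : String) : Decidable (Pre_sortString s) := by unfold Pre_sortString; infer_instance
def pvWitness_sortString : String := "leetcode"

def Spec_sortString (s : String) (out : String) : Prop := out = sortString_alt s
instance (s : String) (out : String) : Decidable (Spec_sortString s out) := by unfold Spec_sortString; infer_instance

-- ===== CLAIM (what is proved, stated in full; the proofs are below) =====
def Claim_equal_sortString : Prop := ∀ (s : String), Dom_sortString s → Pre_sortString s → Spec_sortString s (sortString s)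

-- ===== LEMMAS AND PROOFS =====

-- one strictly-increasing sweep: take the first unseen occurrence of each value above `last`
def takeA : List Char → Char → List Char × List Char
  | [], _ => ([], [])
  | c :: t, last =>
    if last < c then (c :: (takeA t c).1, (takeA t c).2)
    else ((takeA t last).1, c :: (takeA t last).2)

-- the mirror sweep, strictly decreasing
def takeD : List Char → Char → List Char × List Char
  | [], _ => ([], [])
  | c :: t, last =>
    if c < last then (c :: (takeD t c).1, (takeD t c).2)
    else ((takeD t last).1, c :: (takeD t last).2)

theorem takeA_len (u : List Char) (e : Char) : (takeA u e).1.length + (takeA u e).2.length = u.length := by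
  induction u generalizing e with
  | nil => simp [takeA]
  | cons c t ih => simp only [takeA]; split <;> simp <;> [exact (by have := ih c; omega); exact (by have := ih e; omega)]
theorem takeD_len (u : List Char) (e : Char) : (takeD u e).1.length + (takeD u e).2.length = u.length := by
  induction u generalizing e with
  | nil => simp [takeD]
  | cons c t ih => simp only [takeD]; split <;> simp <;> [exact (by have := ih c; omega); exact (by have := ih e; omega)]

-- canonical form of A's loop state after a pick: u = unused chars in current orientation
def loopC (u : List Char) (e : Char) (d : Bool) : List Char :=
  let tr := if d then takeD u e else takeA u e
  match hr : tr.2.reverse with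
  | [] => tr.1
  | c :: r' => tr.1 ++ c :: loopC r' c (!d)
termination_by u.length
decreasing_by
  have h1 : tr.1.length + tr.2.length = u.length := by
    by_cases hd : d <;> simp only [tr, hd, if_true, if_false] <;> [exact takeD_len u e; exact takeA_len u e]
  have h2 : tr.2.reverse.length = r'.length + 1 := by rw [hr]; simp
  simp at h2; omega

-- canonical rounds over the sorted remaining multiset M (ascending)
def roundsM (M : List Char) (asc : Bool) : List Char :=
  match M with
  | [] => []
  | c :: t =>
    let dd := c :: (takeA t c).1
    (if asc then dd else dd.reverse) ++ roundsM (takeA t c).2 (!asc)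
termination_by M.length
decreasing_by
  have := takeA_len t c; simp; omega

-- unused characters of A's flagged list, in list order
def unusedZ (z : List (Char × Bool)) : List Char := (z.filter (fun p => !p.2)).map Prod.fst

theorem pvLast_append (ans : List Char) (c : Char) : pvLast (ans ++ [c]) = c := by
  simp [pvLast, PySem.List.pyGet?_neg_one_append_singleton]

theorem pvLast_singleton (c : Char) : pvLast [c] = c := by
  simpa using pvLast_append [] c

theorem unusedZ_cons_true (c : Char) (t : List (Char × Bool)) :
    unusedZ ((c, true) :: t) = unusedZ t := by simp [unusedZ]

theorem unusedZ_cons_false (c : Char) (t : List (Char × Bool)) :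
    unusedZ ((c, false) :: t) = c :: unusedZ t := by simp [unusedZ]

theorem unusedZ_reverse (z : List (Char × Bool)) : unusedZ z.reverse = (unusedZ z).reverse := by
  simp [unusedZ]

theorem any_unused_eq_false {z : List (Char × Bool)} (h : unusedZ z = []) :
    z.any (fun p => !p.2) = false := by
  simp only [unusedZ, List.map_eq_nil_iff, List.filter_eq_nil_iff] at h
  simp only [List.any_eq_false]
  intro p hp; have := h p hp; simpa using this

theorem any_unused_eq_true {z : List (Char × Bool)} {c : Char} {r : List Char}
    (h : unusedZ z = c :: r) : z.any (fun p => !p.2) = true := by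
  have hne : unusedZ z ≠ [] := by rw [h]; simp
  by_contra hfalse
  apply hne
  simp only [Bool.not_eq_true, List.any_eq_false] at hfalse
  simp only [unusedZ, List.map_eq_nil_iff, List.filter_eq_nil_iff]
  intro p hp; have := hfalse p hp; simpa using this

theorem passA_spec (z : List (Char × Bool)) (d : Bool) :
    ∀ ans : List Char, ans ≠ [] →
      (pvPassA z ans d).1 =
        ans ++ ((if d then takeD (unusedZ z) (pvLast ans) else takeA (unusedZ z) (pvLast ans))).1 ∧
      unusedZ (pvPassA z ans d).2 =
        ((if d then takeD (unusedZ z) (pvLast ans) else takeA (unusedZ z) (pvLast ans))).2 := by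
  induction z with
  | nil =>
    intro ans hans
    cases d <;> simp [pvPassA, unusedZ, takeA, takeD]
  | cons p t ih =>
    intro ans hans
    obtain ⟨c, u⟩ := p
    cases u with
    | true =>
      have h1 : (pvPassA ((c, true) :: t) ans d).1 = (pvPassA t ans d).1 := by
        cases d <;> simp [pvPassA]
      have h2 : (pvPassA ((c, true) :: t) ans d).2 = (c, true) :: (pvPassA t ans d).2 := by
        cases d <;> simp [pvPassA]
      rw [h1, h2, unusedZ_cons_true, unusedZ_cons_true]
      exact ih ans hans
    | false =>
      cases d with
      | false =>
        rw [unusedZ_cons_false]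
        by_cases hc : pvLast ans < c
        · have h1 : (pvPassA ((c, false) :: t) ans false).1 = (pvPassA t (ans ++ [c]) false).1 := by
            simp [pvPassA, hc]
          have h2 : (pvPassA ((c, false) :: t) ans false).2
              = (c, true) :: (pvPassA t (ans ++ [c]) false).2 := by
            simp [pvPassA, hc]
          obtain ⟨ih1, ih2⟩ := ih (ans ++ [c]) (by simp)
          rw [h1, h2, unusedZ_cons_true]
          simp only [Bool.false_eq_true, if_false] at ih1 ih2 ⊢
          rw [takeA, if_pos hc]
          refine ⟨?_, ?_⟩
          · rw [ih1, pvLast_append]; simp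
          · rw [ih2, pvLast_append]
        · have h1 : (pvPassA ((c, false) :: t) ans false).1 = (pvPassA t ans false).1 := by
            simp [pvPassA, hc]
          have h2 : (pvPassA ((c, false) :: t) ans false).2
              = (c, false) :: (pvPassA t ans false).2 := by
            simp [pvPassA, hc]
          obtain ⟨ih1, ih2⟩ := ih ans hans
          rw [h1, h2, unusedZ_cons_false]
          simp only [Bool.false_eq_true, if_false] at ih1 ih2 ⊢
          rw [takeA, if_neg hc]
          exact ⟨ih1, by rw [ih2]⟩
      | true =>
        rw [unusedZ_cons_false]
        by_cases hc : c < pvLast ans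
        · have h1 : (pvPassA ((c, false) :: t) ans true).1 = (pvPassA t (ans ++ [c]) true).1 := by
            simp [pvPassA, hc]
          have h2 : (pvPassA ((c, false) :: t) ans true).2
              = (c, true) :: (pvPassA t (ans ++ [c]) true).2 := by
            simp [pvPassA, hc]
          obtain ⟨ih1, ih2⟩ := ih (ans ++ [c]) (by simp)
          rw [h1, h2, unusedZ_cons_true]
          simp only [reduceIte] at ih1 ih2 ⊢
          rw [takeD, if_pos hc]
          refine ⟨?_, ?_⟩
          · rw [ih1, pvLast_append]; simp
          · rw [ih2, pvLast_append]
        · have h1 : (pvPassA ((c, false) :: t) ans true).1 = (pvPassA t ans true).1 := by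
            simp [pvPassA, hc]
          have h2 : (pvPassA ((c, false) :: t) ans true).2
              = (c, false) :: (pvPassA t ans true).2 := by
            simp [pvPassA, hc]
          obtain ⟨ih1, ih2⟩ := ih ans hans
          rw [h1, h2, unusedZ_cons_false]
          simp only [reduceIte] at ih1 ih2 ⊢
          rw [takeD, if_neg hc]
          exact ⟨ih1, by rw [ih2]⟩

theorem pick_spec_nil (z : List (Char × Bool)) (ans : List Char) (h : unusedZ z = []) :
    pvPickA z ans = (z, ans) := by
  induction z with
  | nil => simp [pvPickA]
  | cons p t ih =>
    obtain ⟨c, u⟩ := p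
    cases u with
    | true => rw [unusedZ_cons_true] at h; simp [pvPickA, ih h]
    | false => rw [unusedZ_cons_false] at h; simp at h

theorem pick_spec_cons (z : List (Char × Bool)) (ans : List Char) (c : Char) (r : List Char)
    (h : unusedZ z = c :: r) :
    (pvPickA z ans).2 = ans ++ [c] ∧ unusedZ (pvPickA z ans).1 = r := by
  induction z with
  | nil => simp [unusedZ] at h
  | cons p t ih =>
    obtain ⟨c', u⟩ := p
    cases u with
    | true =>
      rw [unusedZ_cons_true] at h
      obtain ⟨ih1, ih2⟩ := ih h
      constructor
      · simpa [pvPickA] using ih1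
      · simp [pvPickA, unusedZ_cons_true, ih2]
    | false =>
      rw [unusedZ_cons_false] at h
      injection h with hA hB
      subst hA; subst hB
      constructor
      · simp [pvPickA]
      · simp only [pvPickA]
        simp [unusedZ_cons_true]

theorem loopC_unfold_nil {u : List Char} {e : Char} {d : Bool}
    (h : (if d then takeD u e else takeA u e).2.reverse = []) :
    loopC u e d = (if d then takeD u e else takeA u e).1 := by
  rw [loopC]
  split
  · rfl
  · rename_i c r' heq
    rw [h] at heq; cases heq

theorem loopC_unfold_cons {u : List Char} {e : Char} {d : Bool} {c : Char} {r' : List Char}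
    (h : (if d then takeD u e else takeA u e).2.reverse = c :: r') :
    loopC u e d = (if d then takeD u e else takeA u e).1 ++ c :: loopC r' c (!d) := by
  rw [loopC]
  split
  · rename_i heq
    rw [h] at heq; cases heq
  · rename_i c2 r2 heq
    rw [h] at heq
    injection heq with e1 e2
    subst e1; subst e2
    rfl

theorem loopC_nil (e : Char) (d : Bool) : loopC [] e d = [] := by
  have h0 : (if d then takeD ([] : List Char) e else takeA [] e).2.reverse = [] := by
    cases d <;> simp [takeA, takeD]
  rw [loopC_unfold_nil h0]
  cases d <;> simp [takeA, takeD]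

theorem pick_nil₁ {z : List (Char × Bool)} (ans : List Char) (h : unusedZ z = []) :
    (pvPickA z ans).1 = z := by rw [pick_spec_nil _ _ h]

theorem pick_nil₂ {z : List (Char × Bool)} (ans : List Char) (h : unusedZ z = []) :
    (pvPickA z ans).2 = ans := by rw [pick_spec_nil _ _ h]

theorem loopA_eq : ∀ (f : Nat) (z : List (Char × Bool)) (ans : List Char) (d : Bool),
    ans ≠ [] → (unusedZ z).length < f →
    pvLoopA f z ans d = ans ++ loopC (unusedZ z) (pvLast ans) d := by
  intro f
  induction f with
  | zero => intro z ans d _ hf; omega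
  | succ f ih =>
    intro z ans d hans hf
    rcases hu : unusedZ z with _ | ⟨x, xs⟩
    · simp only [pvLoopA, any_unused_eq_false hu, Bool.false_eq_true, if_false]
      rw [loopC_nil]
      simp
    · obtain ⟨p1, p2⟩ := passA_spec z d ans hans
      have hlen : (if d then takeD (unusedZ z) (pvLast ans) else takeA (unusedZ z) (pvLast ans)).1.length
          + (if d then takeD (unusedZ z) (pvLast ans) else takeA (unusedZ z) (pvLast ans)).2.length
          = (unusedZ z).length := by
        cases d
        · simpa using takeA_len (unusedZ z) (pvLast ans)
        · simpa using takeD_len (unusedZ z) (pvLast ans)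
      simp only [pvLoopA, any_unused_eq_true hu, reduceIte]
      have hz2 : unusedZ (pvPassA z ans d).2.reverse
          = (if d then takeD (unusedZ z) (pvLast ans) else takeA (unusedZ z) (pvLast ans)).2.reverse := by
        rw [unusedZ_reverse, p2]
      have hne : (pvPassA z ans d).1 ≠ [] := by rw [p1]; simp [hans]
      rcases hrev : (if d then takeD (unusedZ z) (pvLast ans) else takeA (unusedZ z) (pvLast ans)).2.reverse
        with _ | ⟨c, r'⟩
      · have hf0 : 0 < f := by rw [hu] at hf; simp only [List.length_cons] at hf; omega
        rw [pick_nil₁ _ (by rw [hz2, hrev]), pick_nil₂ _ (by rw [hz2, hrev])]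
        rw [ih _ _ _ hne (by rw [hz2, hrev]; simpa using hf0)]
        rw [hz2, hrev, loopC_nil, p1]
        rw [← hu, loopC_unfold_nil hrev]
        simp
      · obtain ⟨k1, k2⟩ := pick_spec_cons _ (pvPassA z ans d).1 c r' (by rw [hz2, hrev])
        have hr'len : r'.length < f := by
          have h2 : (if d then takeD (unusedZ z) (pvLast ans) else takeA (unusedZ z) (pvLast ans)).2.length = r'.length + 1 := by
            have := congrArg List.length hrev
            simpa using this
          rw [hu] at hlen hf h2
          simp only [List.length_cons] at hlen hf
          omega
        rw [ih _ _ _ (by rw [k1]; simp) (by rw [k2]; exact hr'len)]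
        rw [k1, k2, p1, pvLast_append]
        rw [hu] at hrev
        rw [loopC_unfold_cons hrev]
        rw [hu]
        simp

theorem takeA_perm (u : List Char) (e : Char) : ((takeA u e).1 ++ (takeA u e).2).Perm u := by
  induction u generalizing e with
  | nil => simp [takeA]
  | cons c t ih =>
    rw [takeA]
    split
    · simpa using (ih c).cons c
    · exact (List.perm_middle.trans ((ih e).cons c))

theorem takeD_perm (u : List Char) (e : Char) : ((takeD u e).1 ++ (takeD u e).2).Perm u := by
  induction u generalizing e with
  | nil => simp [takeD]
  | cons c t ih =>
    rw [takeD]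
    split
    · simpa using (ih c).cons c
    · exact (List.perm_middle.trans ((ih e).cons c))

theorem takeA_sub2 (u : List Char) (e : Char) : (takeA u e).2.Sublist u := by
  induction u generalizing e with
  | nil => simp [takeA]
  | cons c t ih =>
    rw [takeA]
    split
    · exact (ih c).cons c
    · exact (ih e).cons₂ c

theorem takeD_sub2 (u : List Char) (e : Char) : (takeD u e).2.Sublist u := by
  induction u generalizing e with
  | nil => simp [takeD]
  | cons c t ih =>
    rw [takeD]
    split
    · exact (ih c).cons c
    · exact (ih e).cons₂ c

theorem takeA_pairwise (u : List Char) (e : Char) (h : (e :: u).Pairwise (· ≤ ·)) :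
    (e :: (takeA u e).1).Pairwise (· < ·) := by
  induction u generalizing e with
  | nil => simp [takeA]
  | cons c t ih =>
    have h' : (c :: t).Pairwise (· ≤ ·) := h.sublist (List.sublist_cons_self _ _)
    rw [takeA]
    split
    · rename_i he
      have hrec := ih c h'
      dsimp only
      rw [List.pairwise_cons]
      refine ⟨?_, hrec⟩
      intro a ha
      rcases List.mem_cons.mp ha with rfl | ha'
      · exact he
      · exact lt_trans he (List.rel_of_pairwise_cons hrec ha')
    · rename_i he
      have hec : e ≤ c := List.rel_of_pairwise_cons h (List.mem_cons_self)
      have hce : e = c := le_antisymm hec (le_of_not_gt he)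
      subst hce
      exact ih e (h.sublist ((List.sublist_cons_self _ _).cons₂ _))

theorem takeD_pairwise (u : List Char) (e : Char) (h : (e :: u).Pairwise (fun a b => b ≤ a)) :
    (e :: (takeD u e).1).Pairwise (fun a b => b < a) := by
  induction u generalizing e with
  | nil => simp [takeD]
  | cons c t ih =>
    have h' : (c :: t).Pairwise (fun a b => b ≤ a) := h.sublist (List.sublist_cons_self _ _)
    rw [takeD]
    split
    · rename_i he
      have hrec := ih c h'
      dsimp only
      rw [List.pairwise_cons]
      refine ⟨?_, hrec⟩
      intro a ha
      rcases List.mem_cons.mp ha with rfl | ha'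
      · exact he
      · exact lt_trans (List.rel_of_pairwise_cons hrec ha') he
    · rename_i he
      have hec : c ≤ e := List.rel_of_pairwise_cons h (List.mem_cons_self)
      have hce : e = c := le_antisymm (le_of_not_gt he) hec
      subst hce
      exact ih e (h.sublist ((List.sublist_cons_self _ _).cons₂ _))

theorem takeA_count (u : List Char) (e : Char) (h : (e :: u).Pairwise (· ≤ ·)) (x : Char) :
    (takeA u e).1.count x = if e < x ∧ x ∈ u then 1 else 0 := by
  induction u generalizing e with
  | nil => simp [takeA]
  | cons c t ih =>
    have h' : (c :: t).Pairwise (· ≤ ·) := h.sublist (List.sublist_cons_self _ _)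
    rw [takeA]
    split
    · rename_i he
      have hrec := ih c h'
      by_cases hx : x = c
      · subst hx
        dsimp only
        rw [List.count_cons]
        simp [hrec, he]
      · have hxt : x ∈ t → c < x → True := fun _ _ => trivial
        rw [List.count_cons]
        simp only [hrec]
        have hmem : (c < x ∧ x ∈ t) ↔ (e < x ∧ x ∈ c :: t) := by
          constructor
          · rintro ⟨h1, h2⟩; exact ⟨lt_trans he h1, List.mem_cons_of_mem _ h2⟩
          · rintro ⟨h1, h2⟩
            rcases List.mem_cons.mp h2 with rfl | h3
            · exact absurd rfl hx
            · exact ⟨lt_of_le_of_ne (List.rel_of_pairwise_cons h' h3) (Ne.symm hx), h3⟩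
        have hx' : ¬ c = x := fun hh => hx hh.symm
        simp [hx, hx', hmem]
    · rename_i he
      have hec : e ≤ c := List.rel_of_pairwise_cons h (List.mem_cons_self)
      have hce : e = c := le_antisymm hec (le_of_not_gt he)
      subst hce
      have hrec := ih e (h.sublist ((List.sublist_cons_self _ _).cons₂ _))
      rw [hrec]
      by_cases hx : x = e
      · subst hx; simp
      · simp [List.mem_cons, hx]

theorem takeD_count (u : List Char) (e : Char) (h : (e :: u).Pairwise (fun a b => b ≤ a)) (x : Char) :
    (takeD u e).1.count x = if x < e ∧ x ∈ u then 1 else 0 := by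
  induction u generalizing e with
  | nil => simp [takeD]
  | cons c t ih =>
    have h' : (c :: t).Pairwise (fun a b => b ≤ a) := h.sublist (List.sublist_cons_self _ _)
    rw [takeD]
    split
    · rename_i he
      have hrec := ih c h'
      by_cases hx : x = c
      · subst hx
        dsimp only
        rw [List.count_cons]
        simp [hrec, he]
      · dsimp only
        rw [List.count_cons]
        simp only [hrec]
        have hmem : (x < c ∧ x ∈ t) ↔ (x < e ∧ x ∈ c :: t) := by
          constructor
          · rintro ⟨h1, h2⟩; exact ⟨lt_trans h1 he, List.mem_cons_of_mem _ h2⟩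
          · rintro ⟨h1, h2⟩
            rcases List.mem_cons.mp h2 with rfl | h3
            · exact absurd rfl hx
            · exact ⟨lt_of_le_of_ne (List.rel_of_pairwise_cons h' h3) hx, h3⟩
        have hx' : ¬ c = x := fun hh => hx hh.symm
        simp [hx, hx', hmem]
    · rename_i he
      have hec : c ≤ e := List.rel_of_pairwise_cons h (List.mem_cons_self)
      have hce : e = c := le_antisymm (le_of_not_gt he) hec
      subst hce
      have hrec := ih e (h.sublist ((List.sublist_cons_self _ _).cons₂ _))
      rw [hrec]
      by_cases hx : x = e
      · subst hx; simp
      · simp [List.mem_cons, hx]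

theorem mem_iff_asc {c0 : Char} {t0 : List Char} {x : Char}
    (hs : (c0 :: t0).Pairwise (· ≤ ·)) (hx : x ≠ c0) : (c0 < x ∧ x ∈ t0) ↔ x ∈ c0 :: t0 := by
  constructor
  · rintro ⟨_, h2⟩; exact List.mem_cons_of_mem _ h2
  · intro h
    rcases List.mem_cons.mp h with rfl | h3
    · exact absurd rfl hx
    · exact ⟨lt_of_le_of_ne (List.rel_of_pairwise_cons hs h3) (Ne.symm hx), h3⟩

theorem mem_iff_desc {e : Char} {u : List Char} {x : Char}
    (hs : (e :: u).Pairwise (fun a b => b ≤ a)) (hx : x ≠ e) : (x < e ∧ x ∈ u) ↔ x ∈ e :: u := by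
  constructor
  · rintro ⟨_, h2⟩; exact List.mem_cons_of_mem _ h2
  · intro h
    rcases List.mem_cons.mp h with rfl | h3
    · exact absurd rfl hx
    · exact ⟨lt_of_le_of_ne (List.rel_of_pairwise_cons hs h3) hx, h3⟩

theorem count_one_asc {c0 : Char} {t0 : List Char} (hs : (c0 :: t0).Pairwise (· ≤ ·)) (x : Char) :
    (c0 :: (takeA t0 c0).1).count x = if x ∈ c0 :: t0 then 1 else 0 := by
  rw [List.count_cons, takeA_count t0 c0 hs x]
  by_cases hx : x = c0
  · subst hx; simp
  · simp only [← mem_iff_asc hs hx]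
    have hx' : ¬ c0 = x := fun hh => hx hh.symm
    simp [hx, hx']

theorem count_one_desc {e : Char} {u : List Char} (hs : (e :: u).Pairwise (fun a b => b ≤ a)) (x : Char) :
    (e :: (takeD u e).1).count x = if x ∈ e :: u then 1 else 0 := by
  rw [List.count_cons, takeD_count u e hs x]
  by_cases hx : x = e
  · subst hx; simp
  · simp only [← mem_iff_desc hs hx]
    have hx' : ¬ e = x := fun hh => hx hh.symm
    simp [hx, hx']

theorem count_split_asc (t0 : List Char) (c0 : Char) (x : Char) :
    (takeA t0 c0).1.count x + (takeA t0 c0).2.count x = t0.count x := by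
  have := (List.perm_iff_count.mp (takeA_perm t0 c0)) x
  simpa [List.count_append] using this

theorem count_split_desc (u : List Char) (e : Char) (x : Char) :
    (takeD u e).1.count x + (takeD u e).2.count x = u.count x := by
  have := (List.perm_iff_count.mp (takeD_perm u e)) x
  simpa [List.count_append] using this

theorem count_rest_asc {c0 : Char} {t0 : List Char} (hs : (c0 :: t0).Pairwise (· ≤ ·)) (x : Char) :
    (takeA t0 c0).2.count x = (c0 :: t0).count x - (if x ∈ c0 :: t0 then 1 else 0) := by
  have h1 := count_split_asc t0 c0 x
  have h2 := takeA_count t0 c0 hs x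
  rw [List.count_cons]
  by_cases hx : x = c0
  · subst hx
    simp only [lt_irrefl, false_and, if_false] at h2
    simp [h2] at h1 ⊢
    omega
  · simp only [← mem_iff_asc hs hx]
    have hx' : ¬ c0 = x := fun hh => hx hh.symm
    simp [hx, hx']
    by_cases hm : c0 < x ∧ x ∈ t0
    · simp [hm, hx'] at h2 ⊢; omega
    · simp [hm, hx'] at h2 ⊢
      have hx0 : t0.count x = 0 ∨ c0 < x ∧ x ∈ t0 := by
        by_cases hmem : x ∈ t0
        · right
          exact ⟨lt_of_le_of_ne (List.rel_of_pairwise_cons hs hmem) (Ne.symm hx), hmem⟩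
        · left; exact List.count_eq_zero_of_not_mem hmem
      rcases hx0 with h0 | h0
      · omega
      · exact absurd h0 hm

theorem count_rest_desc {e : Char} {u : List Char} (hs : (e :: u).Pairwise (fun a b => b ≤ a)) (x : Char) :
    (takeD u e).2.count x = (e :: u).count x - (if x ∈ e :: u then 1 else 0) := by
  have h1 := count_split_desc u e x
  have h2 := takeD_count u e hs x
  rw [List.count_cons]
  by_cases hx : x = e
  · subst hx
    simp only [lt_irrefl, false_and, if_false] at h2
    simp [h2] at h1 ⊢
    omega
  · simp only [← mem_iff_desc hs hx]
    have hx' : ¬ e = x := fun hh => hx hh.symm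
    simp [hx, hx']
    by_cases hm : x < e ∧ x ∈ u
    · simp [hm, hx'] at h2 ⊢; omega
    · simp [hm, hx'] at h2 ⊢
      have hx0 : u.count x = 0 ∨ x < e ∧ x ∈ u := by
        by_cases hmem : x ∈ u
        · right
          exact ⟨lt_of_le_of_ne (List.rel_of_pairwise_cons hs hmem) hx, hmem⟩
        · left; exact List.count_eq_zero_of_not_mem hmem
      rcases hx0 with h0 | h0
      · omega
      · exact absurd h0 hm

theorem mirror_taken {e c0 : Char} {u t0 : List Char}
    (hdesc : (e :: u).Pairwise (fun a b => b ≤ a)) (hM : (e :: u).reverse = c0 :: t0) :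
    c0 :: (takeA t0 c0).1 = (e :: (takeD u e).1).reverse := by
  have hs0 : (c0 :: t0).Pairwise (· ≤ ·) := by
    rw [← hM, List.pairwise_reverse]
    exact hdesc
  have hcnt : ∀ x, (c0 :: t0).count x = (e :: u).count x := by
    intro x
    rw [← hM, List.count_reverse]
  have hmem : ∀ x : Char, x ∈ c0 :: t0 ↔ x ∈ e :: u := by
    intro x
    rw [← hM, List.mem_reverse]
  have hperm : (c0 :: (takeA t0 c0).1).Perm ((e :: (takeD u e).1).reverse) := by
    rw [List.perm_iff_count]
    intro x
    rw [List.count_reverse, count_one_asc hs0 x, count_one_desc hdesc x]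
    simp [hmem x]
  exact hperm.eq_of_pairwise' (r := (· ≤ ·))
    ((takeA_pairwise t0 c0 hs0).imp le_of_lt)
    (List.pairwise_reverse.mpr ((takeD_pairwise u e hdesc).imp (fun h => le_of_lt h)))

theorem mirror_rest {e c0 : Char} {u t0 : List Char}
    (hdesc : (e :: u).Pairwise (fun a b => b ≤ a)) (hM : (e :: u).reverse = c0 :: t0) :
    (takeA t0 c0).2 = ((takeD u e).2).reverse := by
  have hs0 : (c0 :: t0).Pairwise (· ≤ ·) := by
    rw [← hM, List.pairwise_reverse]
    exact hdesc
  have hcnt : ∀ x, (c0 :: t0).count x = (e :: u).count x := by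
    intro x
    rw [← hM, List.count_reverse]
  have hmem : ∀ x : Char, x ∈ c0 :: t0 ↔ x ∈ e :: u := by
    intro x
    rw [← hM, List.mem_reverse]
  have hperm : ((takeA t0 c0).2).Perm (((takeD u e).2).reverse) := by
    rw [List.perm_iff_count]
    intro x
    rw [List.count_reverse, count_rest_asc hs0 x, count_rest_desc hdesc x]
    rw [hcnt x]
    simp [hmem x]
  exact hperm.eq_of_pairwise' (r := (· ≤ ·))
    ((hs0.sublist (List.sublist_cons_self _ _)).sublist (takeA_sub2 t0 c0))
    (List.pairwise_reverse.mpr ((hdesc.sublist (List.sublist_cons_self _ _)).sublist (takeD_sub2 u e)))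

theorem roundsM_nil (asc : Bool) : roundsM [] asc = [] := by rw [roundsM]

theorem roundsM_cons (c : Char) (t : List Char) (asc : Bool) :
    roundsM (c :: t) asc
      = (if asc then c :: (takeA t c).1 else (c :: (takeA t c).1).reverse)
        ++ roundsM (takeA t c).2 (!asc) := by
  rw [roundsM]

theorem loopC_eq_roundsM : ∀ (n : Nat) (u : List Char) (e : Char) (d : Bool), u.length ≤ n →
    (if d then (e :: u).Pairwise (fun a b => b ≤ a) else (e :: u).Pairwise (· ≤ ·)) →
    e :: loopC u e d = roundsM (if d then (e :: u).reverse else e :: u) (!d) := by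
  intro n
  induction n with
  | zero =>
    intro u e d hl _
    have hu : u = [] := List.length_eq_zero_iff.mp (Nat.le_zero.mp hl)
    subst hu
    cases d <;> simp [loopC_nil, roundsM, takeA]
  | succ n ih =>
    intro u e d hl hs
    cases d with
    | false =>
      simp only [Bool.not_false, Bool.false_eq_true, if_false] at hs ⊢
      rw [roundsM_cons]
      simp only [reduceIte]
      rcases hrev : (takeA u e).2.reverse with _ | ⟨c, r'⟩
      · have h2 : (takeA u e).2 = [] := by
          have := congrArg List.reverse hrev
          simpa using this
        rw [loopC_unfold_nil (d := false) (by simpa using hrev), h2, roundsM_nil]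
        simp
      · rw [loopC_unfold_cons (d := false) (by simpa using hrev)]
        have hsorted2 : (takeA u e).2.Pairwise (· ≤ ·) :=
          (hs.sublist (List.sublist_cons_self _ _)).sublist (takeA_sub2 u e)
        have hdesc' : (c :: r').Pairwise (fun a b => b ≤ a) := by
          rw [← hrev]
          exact List.pairwise_reverse.mpr hsorted2
        have hlen' : r'.length ≤ n := by
          have h1 := takeA_len u e
          have h2 : (takeA u e).2.length = r'.length + 1 := by
            have := congrArg List.length hrev
            simpa using this
          omega
        have hIH := ih r' c true hlen' (by simpa using hdesc')
        simp only [Bool.not_true, reduceIte] at hIH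
        have hcr : (c :: r').reverse = (takeA u e).2 := by
          rw [← hrev, List.reverse_reverse]
        rw [hcr] at hIH
        simp only [Bool.not_true]
        rw [← hIH]
        simp
    | true =>
      simp only [Bool.not_true, reduceIte] at hs ⊢
      rcases hM : (e :: u).reverse with _ | ⟨c0, t0⟩
      · exact absurd (congrArg List.length hM) (by simp)
      rw [roundsM_cons]
      simp only [Bool.not_false, reduceIte]
      rw [mirror_taken hs hM, List.reverse_reverse, mirror_rest hs hM]
      rcases hrev : (takeD u e).2.reverse with _ | ⟨c, r'⟩
      · rw [loopC_unfold_nil (d := true) (by simpa using hrev), roundsM_nil]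
        simp
      · rw [loopC_unfold_cons (d := true) (by simpa using hrev)]
        have hsorted2 : (takeD u e).2.Pairwise (fun a b => b ≤ a) :=
          (hs.sublist (List.sublist_cons_self _ _)).sublist (takeD_sub2 u e)
        have hasc' : (c :: r').Pairwise (· ≤ ·) := by
          rw [← hrev]
          exact List.pairwise_reverse.mpr hsorted2
        have hlen' : r'.length ≤ n := by
          have h1 := takeD_len u e
          have h2 : (takeD u e).2.length = r'.length + 1 := by
            have := congrArg List.length hrev
            simpa using this
          omega
        have hIH := ih r' c false hlen' (by simpa using hasc')
        simp only [Bool.not_false, Bool.false_eq_true, if_false] at hIH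
        rw [← hIH]
        simp

-- B side: pairs (char, multiplicity ≥ 1) with strictly increasing keys, expanded to the multiset
def expandP : List (Char × Int) → List Char
  | [] => []
  | (c, k) :: t => List.replicate k.toNat c ++ expandP t

def decP (p : List (Char × Int)) : List (Char × Int) :=
  p.filterMap (fun q => if 1 < q.2 then some (q.1, q.2 - 1) else none)

theorem roundB1 (p : List (Char × Int)) : (pvRoundB p).1 = p.map Prod.fst := by
  induction p with
  | nil => simp [pvRoundB]
  | cons q t ih => obtain ⟨c, k⟩ := q; simp [pvRoundB, ih]

theorem roundB2 (p : List (Char × Int)) : (pvRoundB p).2 = decP p := by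
  induction p with
  | nil => simp [pvRoundB, decP]
  | cons q t ih =>
    obtain ⟨c, k⟩ := q
    by_cases hk1 : (1 : Int) < k <;>
      simp [pvRoundB, ih, decP, List.filterMap_cons, hk1]

theorem mem_decP {p : List (Char × Int)} {q' : Char × Int} :
    q' ∈ decP p ↔ ∃ q ∈ p, 1 < q.2 ∧ q' = (q.1, q.2 - 1) := by
  simp only [decP, List.mem_filterMap]
  constructor
  · rintro ⟨q, hq, hsome⟩
    split at hsome
    · exact ⟨q, hq, by assumption, by cases hsome; rfl⟩
    · cases hsome
  · rintro ⟨q, hq, h1, rfl⟩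
    exact ⟨q, hq, by simp [h1]⟩

theorem decP_pairwise {p : List (Char × Int)} (h : p.Pairwise (fun a b => a.1 < b.1)) :
    (decP p).Pairwise (fun a b => a.1 < b.1) := by
  unfold decP
  rw [List.pairwise_filterMap]
  refine h.imp ?_
  intro a b hab x hx y hy
  split at hx
  · split at hy
    · cases hx; cases hy; exact hab
    · cases hy
  · cases hx

theorem decP_counts {p : List (Char × Int)} (q' : Char × Int) (hq' : q' ∈ decP p) : 1 ≤ q'.2 := by
  obtain ⟨q, _, h1, rfl⟩ := mem_decP.mp hq'
  simp; omega

theorem len_expandP_decP : ∀ (p : List (Char × Int)), (∀ q ∈ p, 1 ≤ q.2) →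
    (expandP (decP p)).length + p.length = (expandP p).length := by
  intro p
  induction p with
  | nil => intro _; simp [expandP, decP]
  | cons q t ih =>
    intro h1
    obtain ⟨c, k⟩ := q
    have hk : (1 : Int) ≤ k := h1 (c, k) List.mem_cons_self
    have iht := ih (fun q hq => h1 q (List.mem_cons_of_mem _ hq))
    simp only [decP, List.filterMap_cons] at *
    by_cases hk1 : (1 : Int) < k
    · simp only [if_pos hk1, Option.some.injEq]
      simp only [expandP, List.length_append, List.length_replicate, List.length_cons]
      have : (k - 1).toNat = k.toNat - 1 := by omega
      omega
    · simp only [if_neg hk1]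
      simp only [expandP, List.length_append, List.length_replicate, List.length_cons]
      omega

theorem len_expandP_ge : ∀ (p : List (Char × Int)), (∀ q ∈ p, 1 ≤ q.2) →
    p.length ≤ (expandP p).length := by
  intro p
  induction p with
  | nil => intro _; simp [expandP]
  | cons q t ih =>
    intro h1
    obtain ⟨c, k⟩ := q
    have hk : (1 : Int) ≤ k := h1 (c, k) List.mem_cons_self
    have iht := ih (fun q hq => h1 q (List.mem_cons_of_mem _ hq))
    simp only [expandP, List.length_append, List.length_replicate, List.length_cons]
    omega

theorem takeA_replicate_skip : ∀ (m : Nat) (w : List Char) (e c : Char), ¬ e < c →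
    takeA (List.replicate m c ++ w) e
      = ((takeA w e).1, List.replicate m c ++ (takeA w e).2) := by
  intro m
  induction m with
  | zero => intro w e c _; simp [List.replicate_zero]
  | succ m ih =>
    intro w e c h
    rw [List.replicate_succ]
    simp only [List.cons_append, takeA, if_neg h]
    rw [ih w e c h]

theorem takeA_expandP : ∀ (t : List (Char × Int)) (e : Char),
    t.Pairwise (fun a b => a.1 < b.1) → (∀ q ∈ t, 1 ≤ q.2) → (∀ q ∈ t, e < q.1) →
    takeA (expandP t) e = (t.map Prod.fst, expandP (decP t)) := by
  intro t
  induction t with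
  | nil => intro e _ _ _; simp [expandP, takeA, decP]
  | cons q t' ih =>
    intro e hp h1 hgt
    obtain ⟨c, k⟩ := q
    have hk : (1 : Int) ≤ k := h1 (c, k) List.mem_cons_self
    have hkt : k.toNat = (k.toNat - 1) + 1 := by omega
    have hec : e < c := hgt (c, k) List.mem_cons_self
    have hrec := ih c (hp.sublist (List.sublist_cons_self _ _))
      (fun q hq => h1 q (List.mem_cons_of_mem _ hq))
      (fun q hq => List.rel_of_pairwise_cons hp hq)
    simp only [expandP]
    rw [hkt, List.replicate_succ]
    simp only [List.cons_append, takeA, if_pos hec]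
    rw [takeA_replicate_skip _ _ _ _ (lt_irrefl c), hrec]
    simp only [decP, List.filterMap_cons]
    by_cases hk1 : (1 : Int) < k
    · simp only [if_pos hk1]
      simp only [expandP, List.map_cons]
      have : (k - 1).toNat = k.toNat - 1 := by omega
      rw [this]
    · simp only [if_neg hk1]
      have hke : k = 1 := by omega
      subst hke
      simp [expandP]

theorem decP_reverse (l : List (Char × Int)) : decP l.reverse = (decP l).reverse :=
  List.filterMap_reverse

theorem loopB_eq : ∀ (f : Nat) (p : List (Char × Int)) (asc : Bool),
    p.Pairwise (fun a b => a.1 < b.1) → (∀ q ∈ p, 1 ≤ q.2) → (expandP p).length ≤ f →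
    pvLoopB f p asc = roundsM (expandP p) asc := by
  intro f
  induction f with
  | zero =>
    intro p asc _ _ hl
    have : expandP p = [] := List.length_eq_zero_iff.mp (Nat.le_zero.mp hl)
    rw [pvLoopB, this, roundsM_nil]
  | succ f ih =>
    intro p asc hp h1 hl
    cases p with
    | nil => simp [pvLoopB, expandP, roundsM_nil]
    | cons q t =>
      obtain ⟨c, k⟩ := q
      have hk : (1 : Int) ≤ k := h1 (c, k) List.mem_cons_self
      have hkt : k.toNat = (k.toNat - 1) + 1 := by omega
      have htake : takeA (List.replicate (k.toNat - 1) c ++ expandP t) c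
          = (t.map Prod.fst, List.replicate (k.toNat - 1) c ++ expandP (decP t)) := by
        rw [takeA_replicate_skip _ _ _ _ (lt_irrefl c)]
        rw [takeA_expandP t c (hp.sublist (List.sublist_cons_self _ _))
          (fun q hq => h1 q (List.mem_cons_of_mem _ hq))
          (fun q hq => List.rel_of_pairwise_cons hp hq)]
      have hexp : expandP ((c, k) :: t) = c :: (List.replicate (k.toNat - 1) c ++ expandP t) := by
        simp only [expandP]
        rw [hkt, List.replicate_succ]
        simp
      have hrest : List.replicate (k.toNat - 1) c ++ expandP (decP t) = expandP (decP ((c, k) :: t)) := by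
        simp only [decP, List.filterMap_cons]
        by_cases hk1 : (1 : Int) < k
        · simp only [if_pos hk1]
          simp only [expandP]
          have : (k - 1).toNat = k.toNat - 1 := by omega
          rw [this]
        · simp only [if_neg hk1]
          have hke : k = 1 := by omega
          subst hke
          simp [expandP]
      have hdd : c :: (takeA (List.replicate (k.toNat - 1) c ++ expandP t) c).1
          = ((c, k) :: t).map Prod.fst := by
        rw [htake]; simp
      have hinv2 : ∀ q ∈ decP ((c, k) :: t), (1 : Int) ≤ q.2 := fun q hq => decP_counts q hq
      have hinvp : (decP ((c, k) :: t)).Pairwise (fun a b => a.1 < b.1) := decP_pairwise hp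
      have hlen : (expandP (decP ((c, k) :: t))).length ≤ f := by
        have h2 := len_expandP_decP ((c, k) :: t) h1
        have h3 := len_expandP_ge ((c, k) :: t) h1
        simp only [List.length_cons] at h2 h3
        omega
      have hIH := ih (decP ((c, k) :: t)) (!asc) hinvp hinv2 hlen
      rw [hexp, roundsM_cons, htake, hrest, ← hIH, pvLoopB]
      cases asc with
      | true => simp [roundB1, roundB2]
      | false =>
        simp only [roundB1, roundB2, Bool.false_eq_true, if_false, reduceCtorEq, reduceIte]
        rw [decP_reverse]
        simp

theorem unusedZ_zip_false : ∀ (l : List Char),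
    unusedZ (l.zip (List.replicate l.length false)) = l := by
  intro l
  induction l with
  | nil => simp [unusedZ]
  | cons c t ih =>
    simp only [List.length_cons, List.replicate_succ, List.zip_cons_cons]
    rw [unusedZ_cons_false, ih]

theorem mem_expandP : ∀ (t : List (Char × Int)) (x : Char), x ∈ expandP t → ∃ q ∈ t, x = q.1 := by
  intro t
  induction t with
  | nil => intro x hx; simp [expandP] at hx
  | cons q t' ih =>
    intro x hx
    obtain ⟨c, k⟩ := q
    simp only [expandP, List.mem_append] at hx
    rcases hx with hx | hx
    · exact ⟨(c, k), List.mem_cons_self, (List.eq_of_mem_replicate hx)⟩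
    · obtain ⟨q, hq, he⟩ := ih x hx
      exact ⟨q, List.mem_cons_of_mem _ hq, he⟩

theorem expandP_pairwise : ∀ (p : List (Char × Int)), p.Pairwise (fun a b => a.1 < b.1) →
    (expandP p).Pairwise (· ≤ ·) := by
  intro p
  induction p with
  | nil => simp [expandP]
  | cons q t ih =>
    intro hp
    obtain ⟨c, k⟩ := q
    simp only [expandP]
    rw [List.pairwise_append]
    refine ⟨List.pairwise_replicate.mpr (Or.inr le_rfl), ih (hp.sublist (List.sublist_cons_self _ _)), ?_⟩
    intro x hx y hy
    obtain ⟨q, hq, rfl⟩ := mem_expandP t y hy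
    have hxc : x = c := List.eq_of_mem_replicate hx
    subst hxc
    exact le_of_lt (List.rel_of_pairwise_cons hp hq)

theorem count_expandP : ∀ (ks : List Char), ks.Nodup → ∀ (m : Char → Nat) (x : Char),
    (expandP (ks.map (fun c => (c, (m c : Int))))).count x = if x ∈ ks then m x else 0 := by
  intro ks
  induction ks with
  | nil => intro _ m x; simp [expandP]
  | cons c t ih =>
    intro hnd m x
    simp only [List.map_cons, expandP, List.count_append]
    rw [ih hnd.of_cons m x]
    rw [List.count_replicate]
    by_cases hx : x = c
    · subst hx
      have hnx : x ∉ t := (List.nodup_cons.mp hnd).1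
      simp [hnx]
    · have hx' : ¬ (x == c) = true := by simp [hx]
      have hcx : ¬ c = x := fun hh => hx hh.symm
      simp [hx', hx, hcx, List.mem_cons]

theorem sortString_eq_rounds (s : String) (c : Char) (rest : List Char)
    (hsort : PySem.List.sorted s.toList (fun x => x) false = c :: rest) :
    sortString s = String.mk (roundsM (c :: rest) true) := by
  have hsp : (c :: rest).Pairwise (· ≤ ·) := by
    rw [← hsort]
    exact PySem.List.sorted_pairwise s.toList (fun x => x)
  have hz0 : unusedZ ((c :: rest).zip (true :: List.replicate rest.length false)) = rest := by
    rw [List.zip_cons_cons, unusedZ_cons_true, unusedZ_zip_false]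
  have hA : sortString s
      = String.mk (pvLoopA (c :: rest).length
          ((c :: rest).zip (true :: List.replicate rest.length false)) [c] false) := by
    unfold sortString
    rw [hsort]
  rw [hA, loopA_eq (c :: rest).length _ [c] false (by simp) (by rw [hz0]; simp)]
  rw [hz0, pvLast_singleton]
  have hC := loopC_eq_roundsM rest.length rest c false le_rfl (by simpa using hsp)
  simp only [Bool.false_eq_true, if_false, Bool.not_false] at hC
  rw [show [c] ++ loopC rest c false = c :: loopC rest c false from rfl, hC]

theorem sortString_alt_eq_rounds (s : String) :
    sortString_alt s
      = String.mk (pvLoopB s.toList.length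
          ((PySem.List.sorted (PySem.Set.ofList s.toList) (fun x => x) false).map
            (fun c => (c, (s.toList.count c : Int)))) true) := by
  simp only [sortString_alt, PySem.Dict.foldl_insert_getD_add_one_eq_counter,
    PySem.Dict.keys_counter, PySem.Dict.getD_counter]

theorem main_eq (s : String) (hpre : s.toList ≠ []) : sortString s = sortString_alt s := by
  have hlper := PySem.List.sorted_perm s.toList (fun x => x) false
  rcases hsort : PySem.List.sorted s.toList (fun x => x) false with _ | ⟨c, rest⟩
  · exfalso
    apply hpre
    rw [hsort] at hlper
    exact List.Perm.eq_nil hlper.symm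
  · rw [hsort] at hlper
    -- B's pair list
    have hkey := PySem.List.sorted_ofList_pairwise_lt (κ := Char) s.toList
    have hknd : (PySem.List.sorted (PySem.Set.ofList s.toList) (fun x => x) false).Nodup :=
      hkey.imp ne_of_lt
    have hmemk : ∀ x : Char,
        x ∈ PySem.List.sorted (PySem.Set.ofList s.toList) (fun x => x) false ↔ x ∈ s.toList := by
      intro x
      rw [PySem.List.mem_sorted, PySem.Set.mem_ofList]
    set P := (PySem.List.sorted (PySem.Set.ofList s.toList) (fun x => x) false).map
      (fun c => (c, (s.toList.count c : Int))) with hP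
    have hPp : P.Pairwise (fun a b => a.1 < b.1) := by
      rw [hP, List.pairwise_map]
      exact hkey
    have hP1 : ∀ q ∈ P, (1 : Int) ≤ q.2 := by
      intro q hq
      rw [hP, List.mem_map] at hq
      obtain ⟨x, hx, rfl⟩ := hq
      have : x ∈ s.toList := (hmemk x).mp hx
      have := List.count_pos_iff.mpr this
      simp
      omega
    have hcnt : ∀ x, (expandP P).count x = (c :: rest).count x := by
      intro x
      rw [hP, count_expandP _ hknd (fun c => s.toList.count c) x]
      rw [hlper.count_eq x]
      by_cases hx : x ∈ s.toList
      · simp [(hmemk x).mpr hx, hx]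
      · have h0 : s.toList.count x = 0 := List.count_eq_zero_of_not_mem hx
        simp [hx, h0, fun hh => hx ((hmemk x).mp hh)]
    have hexpand : expandP P = c :: rest := by
      have hperm : (expandP P).Perm (c :: rest) := List.perm_iff_count.mpr hcnt
      have hs1 : (expandP P).Pairwise (· ≤ ·) := expandP_pairwise P hPp
      have hs2 : (c :: rest).Pairwise (· ≤ ·) := by
        rw [← hsort]
        exact PySem.List.sorted_pairwise s.toList (fun x => x)
      exact hperm.eq_of_pairwise' (r := (· ≤ ·)) hs1 hs2
    have hlen : (expandP P).length ≤ s.toList.length := by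
      rw [hexpand]
      rw [hlper.length_eq]
    rw [sortString_eq_rounds s c rest hsort, sortString_alt_eq_rounds s]
    rw [loopB_eq s.toList.length P true hPp hP1 hlen, hexpand]

-- ===== VERDICT (by name: the statement is the Claim_ definition above) =====
theorem sortString_spec : Claim_equal_sortString := by
  unfold Claim_equal_sortString
  intro s _ hpre
  unfold Spec_sortString
  apply main_eq
  intro h
  exact hpre (String.toList_eq_nil_iff.mp h)
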